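-- pv_equiv track=rewrite | github.com/jerrylewisbh/PotatoBot | core/functions/common.py | get_diff
-- ===== SOURCE A (Python) =====
-- def get_diff(dict_one, dict_two):
--     resource_diff_add = {}
--     resource_diff_del = {}
--     for key, val in dict_one.items():
--         if key in dict_two:
--             diff_count = dict_one[key] - dict_two[key]
--             if diff_count > 0:
--                 resource_diff_add[key] = diff_count
--             elif diff_count < 0:
--                 resource_diff_del[key] = diff_count
--         else:
--             resource_diff_add[key] = val
--     for key, val in dict_two.items():
--         if key not in dict_one:
--             resource_diff_del[key] = -val
--     resource_diff_add = dict(sorted(resource_diff_add.items(), key=lambda x: x[0]))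
--     resource_diff_del = dict(sorted(resource_diff_del.items(), key=lambda x: x[0]))
--     return resource_diff_add, resource_diff_del
-- ===== SOURCE B (Python) =====
-- def get_diff(dict_one, dict_two):
--     # One pass over the sorted union of keys; results come out sorted without sort-of-items calls.
--     keys = sorted(set(list(dict_one) + list(dict_two)))
--     add, dele = [], []
--     for key in keys:
--         if key in dict_one:
--             if key in dict_two:
--                 diff = dict_one[key] - dict_two[key]
--                 if diff > 0:
--                     add.append((key, diff))
--                 elif diff < 0:
--                     dele.append((key, diff))
--             else:
--                 add.append((key, dict_one[key]))
--         else: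
--             dele.append((key, -dict_two[key]))
--     return dict(add), dict(dele)
-- ===== Notes on version B (the rewrite author's own statement) =====
-- stated objective: simpler
-- what changed: Instead of A's two passes building unsorted dicts followed by two item-sorts, B builds the union key set once, iterates it in sorted order in a single pass, and appends each key's add/del contribution, so the outputs are produced already sorted with no item-sort calls.
import Mathlib
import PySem

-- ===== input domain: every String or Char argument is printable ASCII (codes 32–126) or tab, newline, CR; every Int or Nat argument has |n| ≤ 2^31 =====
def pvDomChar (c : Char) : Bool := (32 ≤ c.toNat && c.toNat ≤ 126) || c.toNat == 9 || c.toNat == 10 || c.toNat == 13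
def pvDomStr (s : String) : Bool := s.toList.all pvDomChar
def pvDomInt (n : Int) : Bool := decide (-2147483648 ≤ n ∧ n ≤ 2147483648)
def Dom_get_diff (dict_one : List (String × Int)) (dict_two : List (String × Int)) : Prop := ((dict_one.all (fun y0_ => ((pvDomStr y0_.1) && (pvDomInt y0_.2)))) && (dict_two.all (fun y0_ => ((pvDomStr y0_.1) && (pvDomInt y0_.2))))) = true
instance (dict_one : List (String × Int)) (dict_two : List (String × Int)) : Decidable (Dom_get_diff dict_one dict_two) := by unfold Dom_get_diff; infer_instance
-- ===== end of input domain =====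

-- B makes one pass over the sorted union of the two key sets instead of A's two passes
-- followed by two item sorts (objective: simpler decomposition, same exact results).

-- ===== PORT A =====
-- literal port of A: two dict-building passes, then each result dict rebuilt from its sorted items.
-- 'dict_one[key]' / 'dict_two[key]' always hit (the key was just found in the dict), so getD's default 0 is unreachable.
def get_diff (dict_one : List (String × Int)) (dict_two : List (String × Int)) : (List (String × Int)) × (List (String × Int)) :=
  let d1 : PySem.Dict String Int := PySem.Dict.mk dict_one
  let d2 : PySem.Dict String Int := PySem.Dict.mk dict_two
  let p : PySem.Dict String Int × PySem.Dict String Int :=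
    dict_one.foldl (fun acc kv =>
      if d2.contains kv.1 then
        let diff_count : Int := d1.getD kv.1 0 - d2.getD kv.1 0
        if diff_count > 0 then (acc.1.insert kv.1 diff_count, acc.2)
        else if diff_count < 0 then (acc.1, acc.2.insert kv.1 diff_count)
        else acc
      else (acc.1.insert kv.1 kv.2, acc.2)) (PySem.Dict.empty, PySem.Dict.empty)
  let del : PySem.Dict String Int :=
    dict_two.foldl (fun d kv => if d1.contains kv.1 then d else d.insert kv.1 (-kv.2)) p.2
  (PySem.List.sorted p.1.items (fun x => x.1), PySem.List.sorted del.items (fun x => x.1))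

-- ===== PORT B =====
-- literal port of Source B: one pass over the sorted union of the key sets, appending to two lists.
def get_diff_alt (dict_one : List (String × Int)) (dict_two : List (String × Int)) : (List (String × Int)) × (List (String × Int)) :=
  let d1 : PySem.Dict String Int := PySem.Dict.mk dict_one
  let d2 : PySem.Dict String Int := PySem.Dict.mk dict_two
  let keys : List String :=
    PySem.List.sorted (PySem.Set.ofList (dict_one.map (fun p => p.1) ++ dict_two.map (fun p => p.1))) (fun x => x)
  let r : List (String × Int) × List (String × Int) :=
    keys.foldl (fun acc key =>
      if d1.contains key then
        if d2.contains key then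
          let diff : Int := d1.getD key 0 - d2.getD key 0
          if diff > 0 then (acc.1 ++ [(key, diff)], acc.2)
          else if diff < 0 then (acc.1, acc.2 ++ [(key, diff)])
          else acc
        else (acc.1 ++ [(key, d1.getD key 0)], acc.2)
      else (acc.1, acc.2 ++ [(key, -(d2.getD key 0))])) ([], [])
  r

-- ===== PRECONDITION & SPEC =====
-- The Python arguments are dicts, whose keys are necessarily distinct; an association list
-- with a duplicated key represents no Python input, so Pre_ excludes only those lists.
def Pre_get_diff (dict_one : List (String × Int)) (dict_two : List (String × Int)) : Prop :=
  (dict_one.map (fun p => p.1)).Nodup ∧ (dict_two.map (fun p => p.1)).Nodup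
instance (dict_one : List (String × Int)) (dict_two : List (String × Int)) : Decidable (Pre_get_diff dict_one dict_two) := by unfold Pre_get_diff; infer_instance

def pvWitness_get_diff : (List (String × Int)) × (List (String × Int)) :=
  ([("wood", 5), ("stone", 2)], [("wood", 3), ("coal", 1)])

def Spec_get_diff (dict_one : List (String × Int)) (dict_two : List (String × Int)) (out : (List (String × Int)) × (List (String × Int))) : Prop := out = get_diff_alt dict_one dict_two
instance (dict_one : List (String × Int)) (dict_two : List (String × Int)) (out : (List (String × Int)) × (List (String × Int))) : Decidable (Spec_get_diff dict_one dict_two out) := by unfold Spec_get_diff; infer_instance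

-- ===== CLAIM (what is proved, stated in full; the proofs are below) =====
def Claim_equal_get_diff : Prop := ∀ (dict_one : List (String × Int)) (dict_two : List (String × Int)), Dom_get_diff dict_one dict_two → Pre_get_diff dict_one dict_two → Spec_get_diff dict_one dict_two (get_diff dict_one dict_two)

-- ===== LEMMAS AND PROOFS =====

-- first-match lookup in an association list, as the Python dicts do it
def lkp (l : List (String × Int)) (k : String) : Option Int := (PySem.Dict.mk l).get? k

-- the add-entry a key contributes, as a function of the key only
def entAdd (one two : List (String × Int)) (k : String) : Option (String × Int) :=
  match lkp one k, lkp two k with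
  | some v, some w => if v - w > 0 then some (k, v - w) else none
  | some v, none => some (k, v)
  | none, _ => none

-- the del-entry a key contributes
def entDel (one two : List (String × Int)) (k : String) : Option (String × Int) :=
  match lkp one k, lkp two k with
  | some v, some w => if v - w < 0 then some (k, v - w) else none
  | some _, none => none
  | none, some w => some (k, -w)
  | none, none => none

theorem entAdd_fst {one two : List (String × Int)} {k : String} {q : String × Int}
    (h : entAdd one two k = some q) : q.1 = k := by
  unfold entAdd at h
  cases h1 : lkp one k <;> cases h2 : lkp two k <;> simp [h1, h2] at h
  · simp [← h]
  · simp [← h.2]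

theorem entDel_fst {one two : List (String × Int)} {k : String} {q : String × Int}
    (h : entDel one two k = some q) : q.1 = k := by
  unfold entDel at h
  cases h1 : lkp one k <;> cases h2 : lkp two k <;> simp [h1, h2] at h
  · simp [← h]
  · simp [← h.2]

theorem lkp_of_mem {one : List (String × Int)} (h : (one.map (fun p => p.1)).Nodup)
    {p : String × Int} (hm : p ∈ one) : lkp one p.1 = some p.2 := by
  unfold lkp
  exact PySem.Dict.get?_of_mem_items _ (by exact hm) (by simpa [PySem.Dict.keys] using h)

theorem mem_of_lkp {one : List (String × Int)} {k : String} {v : Int}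
    (h : lkp one k = some v) : (k, v) ∈ one :=
  PySem.Dict.mem_items_of_get?_eq_some _ h

theorem lkp_none_iff {one : List (String × Int)} {k : String} :
    lkp one k = none ↔ k ∉ one.map (fun p => p.1) := by
  unfold lkp
  simpa [PySem.Dict.keys] using PySem.Dict.get?_eq_none_iff_not_mem_keys (PySem.Dict.mk one) k

theorem contains_mk_eq {one : List (String × Int)} {k : String} :
    (PySem.Dict.mk one).contains k = (lkp one k).isSome := by
  unfold lkp
  exact PySem.Dict.contains_eq_isSome_get? _ _

-- generic: a fold that appends each element's two optional contributions is a pair of filterMaps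
theorem foldl_pair_append {α β : Type} (f g : α → Option β) (l : List α) (a b : List β) :
    l.foldl (fun acc k => (acc.1 ++ (f k).toList, acc.2 ++ (g k).toList)) (a, b)
      = (a ++ l.filterMap f, b ++ l.filterMap g) := by
  induction l generalizing a b with
  | nil => simp
  | cons x xs ih => rw [List.foldl_cons, ih]; cases hf : f x <;> cases hg : g x <;>
      simp [hf, hg]

-- the sorted union-of-keys list B iterates
def skeys (one two : List (String × Int)) : List String :=
  PySem.List.sorted (PySem.Set.ofList (one.map (fun p => p.1) ++ two.map (fun p => p.1))) (fun x => x)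

theorem mem_skeys {one two : List (String × Int)} {k : String} :
    k ∈ skeys one two ↔ k ∈ one.map (fun p => p.1) ∨ k ∈ two.map (fun p => p.1) := by
  unfold skeys
  rw [PySem.List.mem_sorted, PySem.Set.mem_ofList, List.mem_append]

-- B's fold step, on any key of skeys, appends exactly the entAdd/entDel contributions
theorem alt_eq (one two : List (String × Int)) :
    get_diff_alt one two
      = ((skeys one two).filterMap (entAdd one two), (skeys one two).filterMap (entDel one two)) := by
  show (skeys one two).foldl _ ([], []) = _
  rw [PySem.List.foldl_congr_mem (skeys one two) _
      (fun acc k => (acc.1 ++ (entAdd one two k).toList, acc.2 ++ (entDel one two k).toList))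
      (([] : List (String × Int)), ([] : List (String × Int)))]
  · exact foldl_pair_append _ _ _ [] []
  · intro acc k hk
    have hks := mem_skeys.mp hk
    rcases acc with ⟨u, v⟩
    simp only [contains_mk_eq, PySem.Dict.getD_eq_get?_getD]
    show (if (lkp one k).isSome = true then _ else _) = _
    unfold entAdd entDel
    cases h1 : lkp one k <;> cases h2 : lkp two k
    · -- both none: impossible, k is a key of one of the dicts
      exfalso
      rcases hks with h | h
      · exact (lkp_none_iff.mp h1) h
      · exact (lkp_none_iff.mp h2) h
    · simp only [lkp] at h1 h2
      simp [h2]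
    · simp only [lkp] at h1 h2
      simp [h1]
    · simp only [lkp] at h1 h2
      simp only [h1, h2, Option.isSome_some, if_true, Option.getD_some]
      split_ifs <;> first | omega | simp

-- the two loop bodies of A, named for the proofs (identical to the lambdas in get_diff)
def astep (one two : List (String × Int)) (acc : PySem.Dict String Int × PySem.Dict String Int) (kv : String × Int) : PySem.Dict String Int × PySem.Dict String Int :=
  if (PySem.Dict.mk two).contains kv.1 then
    if (PySem.Dict.mk one).getD kv.1 0 - (PySem.Dict.mk two).getD kv.1 0 > 0 then
      (acc.1.insert kv.1 ((PySem.Dict.mk one).getD kv.1 0 - (PySem.Dict.mk two).getD kv.1 0), acc.2)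
    else if (PySem.Dict.mk one).getD kv.1 0 - (PySem.Dict.mk two).getD kv.1 0 < 0 then
      (acc.1, acc.2.insert kv.1 ((PySem.Dict.mk one).getD kv.1 0 - (PySem.Dict.mk two).getD kv.1 0))
    else acc
  else (acc.1.insert kv.1 kv.2, acc.2)

def dstep (one : List (String × Int)) (d : PySem.Dict String Int) (kv : String × Int) : PySem.Dict String Int :=
  if (PySem.Dict.mk one).contains kv.1 then d else d.insert kv.1 (-kv.2)

theorem get_diff_eq (one two : List (String × Int)) :
    get_diff one two =
      (PySem.List.sorted (one.foldl (astep one two) (PySem.Dict.empty, PySem.Dict.empty)).1.items (fun x => x.1),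
       PySem.List.sorted (two.foldl (dstep one) (one.foldl (astep one two) (PySem.Dict.empty, PySem.Dict.empty)).2).items (fun x => x.1)) := rfl

-- A's first loop builds exactly the entAdd/entDel contributions of dict_one's keys
theorem loopA (one two : List (String × Int)) (h1 : (one.map (fun p => p.1)).Nodup) :
    ∀ (l : List (String × Int)), l.Sublist one →
    ∀ (a d : PySem.Dict String Int),
      (∀ p ∈ l, a.contains p.1 = false) → (∀ p ∈ l, d.contains p.1 = false) →
      l.foldl (astep one two) (a, d)
        = (PySem.Dict.mk (a.items ++ l.filterMap (fun p => entAdd one two p.1)),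
           PySem.Dict.mk (d.items ++ l.filterMap (fun p => entDel one two p.1))) := by
  intro l hsub
  induction l with
  | nil => intro a d _ _; simp
  | cons kv l ih =>
    intro a d ha hd
    have hmem : kv ∈ one := hsub.subset (List.mem_cons_self)
    have hltail : l.Sublist one := (List.sublist_cons_of_sublist _ (List.Sublist.refl l)).trans hsub
    have hknl : kv.1 ∉ l.map (fun p => p.1) := by
      have hn := (hsub.map (fun p => p.1)).nodup h1
      rw [List.map_cons] at hn
      exact (List.nodup_cons.mp hn).1
    have e1 : lkp one kv.1 = some kv.2 := lkp_of_mem h1 hmem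
    have eg1 : (PySem.Dict.mk one).getD kv.1 0 = kv.2 := by
      rw [PySem.Dict.getD_eq_get?_getD, show (PySem.Dict.mk one).get? kv.1 = some kv.2 from e1]; rfl
    have hfa : ∀ w : Int, ∀ p ∈ l, (a.insert kv.1 w).contains p.1 = false := by
      intro w p hp
      rw [PySem.Dict.contains_insert]
      have hne : p.1 ≠ kv.1 := fun e => hknl (e ▸ List.mem_map_of_mem hp)
      simp [hne, ha p (List.mem_cons_of_mem _ hp)]
    have hfd : ∀ w : Int, ∀ p ∈ l, (d.insert kv.1 w).contains p.1 = false := by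
      intro w p hp
      rw [PySem.Dict.contains_insert]
      have hne : p.1 ≠ kv.1 := fun e => hknl (e ▸ List.mem_map_of_mem hp)
      simp [hne, hd p (List.mem_cons_of_mem _ hp)]
    have hta : ∀ p ∈ l, a.contains p.1 = false := fun p hp => ha p (List.mem_cons_of_mem _ hp)
    have htd : ∀ p ∈ l, d.contains p.1 = false := fun p hp => hd p (List.mem_cons_of_mem _ hp)
    rw [List.foldl_cons]
    cases h2v : lkp two kv.1 with
    | none =>
      have hcont : (PySem.Dict.mk two).contains kv.1 = false := by
        rw [contains_mk_eq, h2v]; rfl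
      have hstep : astep one two (a, d) kv = (a.insert kv.1 kv.2, d) := by
        unfold astep; simp [hcont]
      have hadd : entAdd one two kv.1 = some (kv.1, kv.2) := by unfold entAdd; rw [e1, h2v]
      have hdel : entDel one two kv.1 = none := by unfold entDel; rw [e1, h2v]
      rw [hstep, ih hltail (a.insert kv.1 kv.2) d (hfa kv.2) htd]
      have hins : (a.insert kv.1 kv.2).items = a.items ++ [(kv.1, kv.2)] :=
        PySem.Dict.items_insert_of_not_contains _ _ (ha kv List.mem_cons_self)
      rw [hins]
      simp [hadd, hdel]
    | some w =>
      have hcont : (PySem.Dict.mk two).contains kv.1 = true := by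
        rw [contains_mk_eq, h2v]; rfl
      have eg2 : (PySem.Dict.mk two).getD kv.1 0 = w := by
        rw [PySem.Dict.getD_eq_get?_getD, show (PySem.Dict.mk two).get? kv.1 = some w from h2v]; rfl
      by_cases hpos : (0 : Int) < kv.2 - w
      · have hstep : astep one two (a, d) kv = (a.insert kv.1 (kv.2 - w), d) := by
          unfold astep; simp only [hcont, eg1, eg2]; rw [if_pos trivial, if_pos hpos]
        have hadd : entAdd one two kv.1 = some (kv.1, kv.2 - w) := by
          unfold entAdd; rw [e1, h2v]; exact if_pos hpos
        have hdel : entDel one two kv.1 = none := by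
          unfold entDel; rw [e1, h2v]; exact if_neg (by omega)
        rw [hstep, ih hltail (a.insert kv.1 (kv.2 - w)) d (hfa _) htd]
        have hins : (a.insert kv.1 (kv.2 - w)).items = a.items ++ [(kv.1, kv.2 - w)] :=
          PySem.Dict.items_insert_of_not_contains _ _ (ha kv List.mem_cons_self)
        rw [hins]
        simp [hadd, hdel]
      · by_cases hneg : kv.2 - w < 0
        · have hstep : astep one two (a, d) kv = (a, d.insert kv.1 (kv.2 - w)) := by
            unfold astep; simp only [hcont, eg1, eg2]
            rw [if_pos trivial, if_neg hpos, if_pos hneg]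
          have hadd : entAdd one two kv.1 = none := by
            unfold entAdd; rw [e1, h2v]; exact if_neg hpos
          have hdel : entDel one two kv.1 = some (kv.1, kv.2 - w) := by
            unfold entDel; rw [e1, h2v]; exact if_pos hneg
          rw [hstep, ih hltail a (d.insert kv.1 (kv.2 - w)) hta (hfd _)]
          have hins : (d.insert kv.1 (kv.2 - w)).items = d.items ++ [(kv.1, kv.2 - w)] :=
            PySem.Dict.items_insert_of_not_contains _ _ (hd kv List.mem_cons_self)
          rw [hins]
          simp [hadd, hdel]
        · have hstep : astep one two (a, d) kv = (a, d) := by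
            unfold astep; simp only [hcont, eg1, eg2]
            rw [if_pos trivial, if_neg hpos, if_neg hneg]
          have hadd : entAdd one two kv.1 = none := by
            unfold entAdd; rw [e1, h2v]; exact if_neg hpos
          have hdel : entDel one two kv.1 = none := by
            unfold entDel; rw [e1, h2v]; exact if_neg hneg
          rw [hstep, ih hltail a d hta htd]
          simp [hadd, hdel]

-- the entry A's second loop contributes for a key of dict_two
def g2fun (one : List (String × Int)) (p : String × Int) : Option (String × Int) :=
  if (lkp one p.1).isSome then none else some (p.1, -p.2)

theorem loopB (one : List (String × Int)) :
    ∀ (l : List (String × Int)), (l.map (fun p => p.1)).Nodup →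
    ∀ (d : PySem.Dict String Int),
      (∀ p ∈ l, lkp one p.1 = none → d.contains p.1 = false) →
      l.foldl (dstep one) d = PySem.Dict.mk (d.items ++ l.filterMap (g2fun one)) := by
  intro l
  induction l with
  | nil => intro _ d _; simp
  | cons kv l ih =>
    intro hnd d hfresh
    rw [List.map_cons] at hnd
    have hnd' := List.nodup_cons.mp hnd
    rw [List.foldl_cons]
    cases hx : lkp one kv.1 with
    | some v =>
      have hc : (PySem.Dict.mk one).contains kv.1 = true := by rw [contains_mk_eq, hx]; rfl
      have hstep : dstep one d kv = d := by unfold dstep; simp [hc]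
      have hg : g2fun one kv = none := by unfold g2fun; simp [hx]
      rw [hstep, ih hnd'.2 d (fun p hp h => hfresh p (List.mem_cons_of_mem _ hp) h)]
      simp [hg]
    | none =>
      have hc : (PySem.Dict.mk one).contains kv.1 = false := by rw [contains_mk_eq, hx]; rfl
      have hstep : dstep one d kv = d.insert kv.1 (-kv.2) := by unfold dstep; simp [hc]
      have hg : g2fun one kv = some (kv.1, -kv.2) := by unfold g2fun; simp [hx]
      have hfr : ∀ p ∈ l, lkp one p.1 = none → (d.insert kv.1 (-kv.2)).contains p.1 = false := by
        intro p hp h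
        rw [PySem.Dict.contains_insert]
        have hne : p.1 ≠ kv.1 := by
          intro e; exact hnd'.1 (e ▸ List.mem_map_of_mem hp)
        simp [hne, hfresh p (List.mem_cons_of_mem _ hp) h]
      rw [hstep, ih hnd'.2 _ hfr,
        PySem.Dict.items_insert_of_not_contains _ _ (hfresh kv List.mem_cons_self hx)]
      simp [hg]

-- keys of a filtered contribution list form a sublist of the source keys
theorem map_fst_filterMap_sublist (f : String × Int → Option (String × Int))
    (hf : ∀ p q, f p = some q → q.1 = p.1) (l : List (String × Int)) :
    ((l.filterMap f).map (fun p => p.1)).Sublist (l.map (fun p => p.1)) := by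
  induction l with
  | nil => simp
  | cons p l ih =>
    cases h : f p with
    | none =>
      rw [List.filterMap_cons, h, List.map_cons]
      exact ih.trans (List.sublist_cons_self _ _)
    | some q =>
      rw [List.filterMap_cons, h, List.map_cons, List.map_cons, hf _ _ h]
      exact List.Sublist.cons₂ _ ih

theorem nodup_of_pairwise_fst_lt {l : List (String × Int)}
    (h : l.Pairwise (fun a b => a.1 < b.1)) : l.Nodup :=
  h.imp (fun hab he => absurd (he ▸ hab) (lt_irrefl _))

theorem pairwise_filterMap_skeys (one two : List (String × Int))
    (f : String → Option (String × Int)) (hf : ∀ k q, f k = some q → q.1 = k) :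
    ((skeys one two).filterMap f).Pairwise (fun a b => a.1 < b.1) := by
  apply List.pairwise_filterMap.mpr
  exact (PySem.List.sorted_ofList_pairwise_lt _).imp
    (fun hab q hq q' hq' => by rw [hf _ _ hq, hf _ _ hq']; exact hab)

-- membership characterizations: each list holds exactly the pairs fixed by entAdd/entDel
theorem isSome_one_of_entAdd {one two : List (String × Int)} {k : String} {q : String × Int}
    (h : entAdd one two k = some q) : (lkp one k).isSome := by
  unfold entAdd at h
  cases h1 : lkp one k <;> simp [h1] at h ⊢

theorem lkp_cases_of_entDel {one two : List (String × Int)} {k : String} {q : String × Int}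
    (h : entDel one two k = some q) : (lkp one k).isSome ∨ (lkp two k).isSome := by
  unfold entDel at h
  cases h1 : lkp one k <;> cases h2 : lkp two k <;> simp [h1, h2] at h ⊢

theorem mem_addA {one two : List (String × Int)} {q : String × Int} :
    q ∈ one.filterMap (fun p => entAdd one two p.1) ↔ entAdd one two q.1 = some q := by
  rw [List.mem_filterMap]
  constructor
  · rintro ⟨p, hp, he⟩
    rw [show q.1 = p.1 from entAdd_fst he]; exact he
  · intro he
    obtain ⟨v, hv⟩ := Option.isSome_iff_exists.mp (isSome_one_of_entAdd he)
    exact ⟨(q.1, v), mem_of_lkp hv, by exact he⟩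

theorem mem_addB {one two : List (String × Int)} {q : String × Int} :
    q ∈ (skeys one two).filterMap (entAdd one two) ↔ entAdd one two q.1 = some q := by
  rw [List.mem_filterMap]
  constructor
  · rintro ⟨k, hk, he⟩
    rw [show q.1 = k from entAdd_fst he]; exact he
  · intro he
    refine ⟨q.1, ?_, he⟩
    obtain ⟨v, hv⟩ := Option.isSome_iff_exists.mp (isSome_one_of_entAdd he)
    exact mem_skeys.mpr (Or.inl (List.mem_map_of_mem (a := (q.1, v)) (mem_of_lkp hv)))

theorem mem_delB {one two : List (String × Int)} {q : String × Int} :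
    q ∈ (skeys one two).filterMap (entDel one two) ↔ entDel one two q.1 = some q := by
  rw [List.mem_filterMap]
  constructor
  · rintro ⟨k, hk, he⟩
    rw [show q.1 = k from entDel_fst he]; exact he
  · intro he
    refine ⟨q.1, ?_, he⟩
    rcases lkp_cases_of_entDel he with h | h
    · obtain ⟨v, hv⟩ := Option.isSome_iff_exists.mp h
      exact mem_skeys.mpr (Or.inl (List.mem_map_of_mem (a := (q.1, v)) (mem_of_lkp hv)))
    · obtain ⟨v, hv⟩ := Option.isSome_iff_exists.mp h
      exact mem_skeys.mpr (Or.inr (List.mem_map_of_mem (a := (q.1, v)) (mem_of_lkp hv)))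

theorem mem_delA1 {one two : List (String × Int)} (h1 : (one.map (fun p => p.1)).Nodup)
    {q : String × Int} :
    q ∈ one.filterMap (fun p => entDel one two p.1)
      ↔ entDel one two q.1 = some q ∧ (lkp one q.1).isSome := by
  rw [List.mem_filterMap]
  constructor
  · rintro ⟨p, hp, he⟩
    have hq1 : q.1 = p.1 := entDel_fst he
    refine ⟨by rw [hq1]; exact he, ?_⟩
    rw [hq1, lkp_of_mem h1 hp]; rfl
  · rintro ⟨he, hs⟩
    obtain ⟨v, hv⟩ := Option.isSome_iff_exists.mp hs
    exact ⟨(q.1, v), mem_of_lkp hv, by exact he⟩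

theorem mem_delA2 {one two : List (String × Int)} (h2 : (two.map (fun p => p.1)).Nodup)
    {q : String × Int} :
    q ∈ two.filterMap (g2fun one)
      ↔ entDel one two q.1 = some q ∧ lkp one q.1 = none := by
  rw [List.mem_filterMap]
  constructor
  · rintro ⟨p, hp, he⟩
    unfold g2fun at he
    by_cases hs : (lkp one p.1).isSome
    · simp [hs] at he
    · rw [if_neg (by simpa using hs)] at he
      have hq : q = (p.1, -p.2) := (Option.some_inj.mp he).symm
      have hn : lkp one p.1 = none := Option.not_isSome_iff_eq_none.mp hs
      have h2v : lkp two p.1 = some p.2 := lkp_of_mem h2 hp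
      constructor
      · unfold entDel
        rw [hq]
        show (match lkp one p.1, lkp two p.1 with
          | some v, some w => if v - w < 0 then some (p.1, v - w) else none
          | some _, none => none
          | none, some w => some (p.1, -w)
          | none, none => none) = some (p.1, -p.2)
        rw [hn, h2v]
      · rw [hq]; exact hn
  · rintro ⟨he, hn⟩
    unfold entDel at he
    rw [hn] at he
    cases h2v : lkp two q.1 with
    | none => rw [h2v] at he; simp at he
    | some w =>
      rw [h2v] at he
      simp only [] at he
      refine ⟨(q.1, w), mem_of_lkp h2v, ?_⟩
      unfold g2fun
      simp only [hn]
      simpa using he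

theorem g2fun_fst {one : List (String × Int)} {p q : String × Int}
    (h : g2fun one p = some q) : q.1 = p.1 := by
  unfold g2fun at h
  split at h
  · cases h
  · exact ((Option.some_inj.mp h).symm ▸ rfl)

theorem get_diff_eq_alt (one two : List (String × Int))
    (h1 : (one.map (fun p => p.1)).Nodup) (h2 : (two.map (fun p => p.1)).Nodup) :
    get_diff one two = get_diff_alt one two := by
  rw [alt_eq, get_diff_eq]
  have hA := loopA one two h1 one (List.Sublist.refl one) PySem.Dict.empty PySem.Dict.empty
      (fun p _ => by simp) (fun p _ => by simp)
  rw [hA, show (PySem.Dict.empty : PySem.Dict String Int).items = ([] : List (String × Int)) from rfl]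
  simp only [List.nil_append]
  have hfresh : ∀ p ∈ two, lkp one p.1 = none →
      (PySem.Dict.mk (one.filterMap (fun p => entDel one two p.1))).contains p.1 = false := by
    intro p hp hn
    rw [contains_mk_eq]
    cases hq : lkp (one.filterMap (fun p => entDel one two p.1)) p.1 with
    | none => rfl
    | some v =>
      have hm := (mem_delA1 (two := two) h1).mp (mem_of_lkp hq)
      rw [show ((p.1, v) : String × Int).1 = p.1 from rfl, hn] at hm
      simp at hm
  rw [loopB one two h2 _ hfresh]
  have ndA1 : (one.filterMap (fun p => entAdd one two p.1)).Nodup :=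
    List.Nodup.of_map (fun p => p.1)
      ((map_fst_filterMap_sublist _ (fun p q h => entAdd_fst h) one).nodup h1)
  have ndD1 : (one.filterMap (fun p => entDel one two p.1)).Nodup :=
    List.Nodup.of_map (fun p => p.1)
      ((map_fst_filterMap_sublist _ (fun p q h => entDel_fst h) one).nodup h1)
  have ndD2 : (two.filterMap (g2fun one)).Nodup :=
    List.Nodup.of_map (fun p => p.1)
      ((map_fst_filterMap_sublist _ (fun p q h => g2fun_fst h) two).nodup h2)
  have disj : (one.filterMap (fun p => entDel one two p.1)).Disjoint (two.filterMap (g2fun one)) := by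
    intro q hq1 hq2
    have ha := ((mem_delA1 (two := two) h1).mp hq1).2
    have hb := ((mem_delA2 (one := one) h2).mp hq2).2
    rw [hb] at ha
    simp at ha
  have pairAdd := pairwise_filterMap_skeys one two (entAdd one two) (fun k q h => entAdd_fst h)
  have pairDel := pairwise_filterMap_skeys one two (entDel one two) (fun k q h => entDel_fst h)
  have eAdd : PySem.List.sorted (one.filterMap (fun p => entAdd one two p.1)) (fun x => x.1)
      = (skeys one two).filterMap (entAdd one two) := by
    refine PySem.List.sorted_eq_of_perm_of_pairwise_lt _ _ _ ?_ pairAdd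
    refine (List.perm_ext_iff_of_nodup (nodup_of_pairwise_fst_lt pairAdd) ndA1).mpr ?_
    intro q
    rw [mem_addB, mem_addA]
  have eDel : PySem.List.sorted
        ((PySem.Dict.mk (one.filterMap (fun p => entDel one two p.1))).items
          ++ two.filterMap (g2fun one)) (fun x => x.1)
      = (skeys one two).filterMap (entDel one two) := by
    refine PySem.List.sorted_eq_of_perm_of_pairwise_lt _ _ _ ?_ pairDel
    refine (List.perm_ext_iff_of_nodup (nodup_of_pairwise_fst_lt pairDel)
      (List.Nodup.append ndD1 ndD2 disj)).mpr ?_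
    intro q
    rw [mem_delB]
    show _ ↔ q ∈ (one.filterMap (fun p => entDel one two p.1)) ++ two.filterMap (g2fun one)
    rw [List.mem_append, mem_delA1 (two := two) h1, mem_delA2 (one := one) h2]
    constructor
    · intro he
      cases hx : lkp one q.1 with
      | some v => exact Or.inl ⟨he, rfl⟩
      | none => exact Or.inr ⟨he, rfl⟩
    · rintro (⟨he, _⟩ | ⟨he, _⟩) <;> exact he
  rw [eAdd, eDel]

theorem get_diff_spec : Claim_equal_get_diff := by
  intro one two _ hpre
  show get_diff one two = get_diff_alt one two
  exact get_diff_eq_alt one two hpre.1 hpre.2
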